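-- pv_equiv track=rewrite | github.com/1-Liam/DENSN-Atlas | fixtures/lease_lock/negative_epoch/validator.py | validate_trace
-- ===== SOURCE A (Python) =====
-- def validate_trace(events):
--     """
--     Buggy reference implementation: it tracks only that ACQUIRE happened once.
--     It never models the required lease epoch token before mutation.
--     """
--     saw_acquire = False
--     epoch_seen = False
--     for event in events:
--         if event == "ACQUIRE":
--             saw_acquire = True
--             epoch_seen = False
--         elif event == "EPOCH":
--             if not saw_acquire:
--                 return False
--             epoch_seen = True
--         elif event == "RELEASE":
--             if not saw_acquire:
--                 return False
--         elif event == "MUTATE":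
--             if not saw_acquire or not epoch_seen:
--                 return False
--         else:
--             return False
--     return True
-- ===== SOURCE B (Python) =====
-- _TABLE = {
--     (0, "ACQUIRE"): 1, (1, "ACQUIRE"): 1, (2, "ACQUIRE"): 1,
--     (1, "EPOCH"): 2, (2, "EPOCH"): 2,
--     (1, "RELEASE"): 1, (2, "RELEASE"): 2,
--     (2, "MUTATE"): 2,
-- }
--
-- def validate_trace(events):
--     state = 0
--     for event in events:
--         nxt = _TABLE.get((state, event))
--         if nxt is None:
--             return False
--         state = nxt
--     return True
-- ===== Notes on version B (the rewrite author's own statement) =====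
-- stated objective: idiomatic
-- what changed: Replaces the two boolean flags and nested if/elif branch chain with a single 3-valued state token and an explicit (state, event) -> state transition table; one loop does a table lookup and rejects on a missing entry.
import Mathlib
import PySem

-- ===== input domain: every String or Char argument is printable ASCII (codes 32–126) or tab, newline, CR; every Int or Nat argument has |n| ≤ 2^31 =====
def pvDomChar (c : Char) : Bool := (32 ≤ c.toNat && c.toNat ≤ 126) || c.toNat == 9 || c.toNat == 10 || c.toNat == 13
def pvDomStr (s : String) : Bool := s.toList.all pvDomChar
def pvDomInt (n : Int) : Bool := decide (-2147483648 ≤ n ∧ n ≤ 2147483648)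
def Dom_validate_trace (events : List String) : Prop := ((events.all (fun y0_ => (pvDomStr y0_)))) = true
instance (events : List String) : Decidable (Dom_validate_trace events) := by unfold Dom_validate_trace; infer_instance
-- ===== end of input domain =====

-- B replaces A's two boolean flags and if/elif chain with a 3-valued state token and an
-- explicit (state, event) → state transition table (more idiomatic; same O(n) cost).

-- ===== PORT A =====
-- A's loop over events carrying the two flags saw_acquire / epoch_seen.
def validateLoopA : List String → Bool → Bool → Bool
  | [], _, _ => true
  | e :: rest, sa, es =>
    if e = "ACQUIRE" then validateLoopA rest true false
    else if e = "EPOCH" then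
      if !sa then false else validateLoopA rest sa true
    else if e = "RELEASE" then
      if !sa then false else validateLoopA rest sa es
    else if e = "MUTATE" then
      if !sa || !es then false else validateLoopA rest sa es
    else false

def validate_trace (events : List String) : Bool :=
  validateLoopA events false false

-- ===== PORT B =====
-- B's transition table: (state, event) → next state; missing entries mean reject.
def pvTable : PySem.Dict (Int × String) Int :=
  PySem.Dict.ofList
    [((0, "ACQUIRE"), 1), ((1, "ACQUIRE"), 1), ((2, "ACQUIRE"), 1),
     ((1, "EPOCH"), 2), ((2, "EPOCH"), 2),
     ((1, "RELEASE"), 1), ((2, "RELEASE"), 2),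
     ((2, "MUTATE"), 2)]

def validateLoopB : List String → Int → Bool
  | [], _ => true
  | e :: rest, st =>
    match PySem.Dict.get? pvTable (st, e) with
    | none => false
    | some st' => validateLoopB rest st'

def validate_trace_alt (events : List String) : Bool :=
  validateLoopB events 0

-- ===== PRECONDITION & SPEC =====
def Spec_validate_trace (events : List String) (out : Bool) : Prop := out = validate_trace_alt events
instance (events : List String) (out : Bool) : Decidable (Spec_validate_trace events out) := by unfold Spec_validate_trace; infer_instance

-- ===== CLAIM (what is proved, stated in full; the proofs are below) =====
def Claim_equal_validate_trace : Prop := ∀ (events : List String), Dom_validate_trace events → Spec_validate_trace events (validate_trace events)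

-- ===== LEMMAS AND PROOFS =====
-- A's flag pair (sa, es) corresponds to B's state token: (F,_) ↦ 0, (T,F) ↦ 1, (T,T) ↦ 2.
def pvEncode (sa es : Bool) : Int :=
  if sa then (if es then 2 else 1) else 0

-- lookup facts for the table on the four known event names (evaluated by the kernel)
theorem pvGet_known :
    (PySem.Dict.get? pvTable (0, "ACQUIRE") = some 1 ∧
     PySem.Dict.get? pvTable (1, "ACQUIRE") = some 1 ∧
     PySem.Dict.get? pvTable (2, "ACQUIRE") = some 1) ∧
    (PySem.Dict.get? pvTable (0, "EPOCH") = none ∧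
     PySem.Dict.get? pvTable (1, "EPOCH") = some 2 ∧
     PySem.Dict.get? pvTable (2, "EPOCH") = some 2) ∧
    (PySem.Dict.get? pvTable (0, "RELEASE") = none ∧
     PySem.Dict.get? pvTable (1, "RELEASE") = some 1 ∧
     PySem.Dict.get? pvTable (2, "RELEASE") = some 2) ∧
    (PySem.Dict.get? pvTable (0, "MUTATE") = none ∧
     PySem.Dict.get? pvTable (1, "MUTATE") = none ∧
     PySem.Dict.get? pvTable (2, "MUTATE") = some 2) := by
  decide

-- the table's association list, as built by Dict.ofList (evaluated by the kernel)
theorem pvTable_items :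
    pvTable.items =
      [((0, "ACQUIRE"), 1), ((1, "ACQUIRE"), 1), ((2, "ACQUIRE"), 1),
       ((1, "EPOCH"), 2), ((2, "EPOCH"), 2),
       ((1, "RELEASE"), 1), ((2, "RELEASE"), 2), ((2, "MUTATE"), 2)] := by
  decide

-- a lookup with any other event name misses the table entirely
theorem pvGet_other (st : Int) (e : String)
    (h1 : e ≠ "ACQUIRE") (h2 : e ≠ "EPOCH") (h3 : e ≠ "RELEASE") (h4 : e ≠ "MUTATE") :
    PySem.Dict.get? pvTable (st, e) = none := by
  simp only [PySem.Dict.get?, pvTable_items, Option.map_eq_none_iff, List.find?_eq_none]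
  intro p hp
  simp only [beq_iff_eq]
  fin_cases hp <;> simp [Ne.symm h1, Ne.symm h2, Ne.symm h3, Ne.symm h4]

theorem validateLoop_eq (events : List String) :
    ∀ sa es, validateLoopA events sa es = validateLoopB events (pvEncode sa es) := by
  induction events with
  | nil => intro sa es; rfl
  | cons e rest ih =>
    intro sa es
    by_cases h1 : e = "ACQUIRE"
    · subst h1
      cases sa <;> cases es <;>
        simp [validateLoopA, validateLoopB, pvEncode, pvGet_known.1.1, pvGet_known.1.2.1,
              pvGet_known.1.2.2, ih]
    · by_cases h2 : e = "EPOCH"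
      · subst h2
        cases sa <;> cases es <;>
          simp [validateLoopA, validateLoopB, pvEncode, pvGet_known.2.1.1, pvGet_known.2.1.2.1,
                pvGet_known.2.1.2.2, ih]
      · by_cases h3 : e = "RELEASE"
        · subst h3
          cases sa <;> cases es <;>
            simp [validateLoopA, validateLoopB, pvEncode, pvGet_known.2.2.1.1,
                  pvGet_known.2.2.1.2.1, pvGet_known.2.2.1.2.2, h1, h2, ih]
        · by_cases h4 : e = "MUTATE"
          · subst h4
            cases sa <;> cases es <;>
              simp [validateLoopA, validateLoopB, pvEncode, pvGet_known.2.2.2.1,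
                    pvGet_known.2.2.2.2.1, pvGet_known.2.2.2.2.2, h1, h2, h3, ih]
          · cases sa <;> cases es <;>
              simp [validateLoopA, validateLoopB, pvEncode, pvGet_other _ e h1 h2 h3 h4,
                    h1, h2, h3, h4]

-- ===== VERDICT (by name: the statement is the Claim_ definition above) =====
theorem validate_trace_spec : Claim_equal_validate_trace := by
  intro events _
  unfold Spec_validate_trace validate_trace validate_trace_alt
  exact validateLoop_eq events false false
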